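-- pv_equiv track=rewrite | github.com/MilesBlackwood/pythonProgramming | work/cwk1.py | similarity_grouping
-- ===== SOURCE A (Python) =====
-- def similarity_grouping(data: list) -> list:
--     groupedArray = [] # initialising an array to store the groups of data in
--     for element in data: # iterates through each element within the first array
--         grouped = False # Setting up a boolean so I can tell whether an item has been placed into a group yet.
--         for group in groupedArray:
--             if element in group:
--                 group.append(element)
--                 grouped = True
--                 break
--         if grouped == False: # if no existing group for that element a new group is created in the groupedArray
--             groupedArray.append([element])
--     return groupedArray
-- ===== SOURCE B (Python) =====
-- def similarity_grouping(data: list) -> list: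
--     # Two passes: discover distinct keys in first-occurrence order,
--     # then collect the members of each key by filtering the data.
--     keys = []
--     for x in data:
--         if x not in keys:
--             keys.append(x)
--     return [[y for y in data if y == k] for k in keys]
-- ===== Notes on version B (the rewrite author's own statement) =====
-- stated objective: alternative
-- what changed: Replaces A's interleaved scan-groups-and-append-in-place nested loop with two separate passes: first collect the distinct keys in first-occurrence order, then build each group by filtering the whole data once per key.
import Mathlib
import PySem

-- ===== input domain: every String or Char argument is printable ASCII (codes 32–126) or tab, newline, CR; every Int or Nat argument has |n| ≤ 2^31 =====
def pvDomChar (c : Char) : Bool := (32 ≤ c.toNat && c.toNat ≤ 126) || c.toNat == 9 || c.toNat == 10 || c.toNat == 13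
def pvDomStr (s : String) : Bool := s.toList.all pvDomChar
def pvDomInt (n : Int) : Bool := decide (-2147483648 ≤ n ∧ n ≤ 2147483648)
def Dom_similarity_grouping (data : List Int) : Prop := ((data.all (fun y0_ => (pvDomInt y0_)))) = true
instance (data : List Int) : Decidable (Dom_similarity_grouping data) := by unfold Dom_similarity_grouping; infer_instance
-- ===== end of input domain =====

-- B groups by two separate passes (distinct keys first, then one filter per key) instead of
-- A's interleaved scan-and-append nested loop; objective: alternative decomposition, same cost.

-- ===== PORT A =====
-- inner 'for group in groupedArray: if element in group: group.append(element); break'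
-- plus the trailing 'if grouped == False: groupedArray.append([element])'
def pvAddElem (gs : List (List Int)) (e : Int) : List (List Int) :=
  match gs with
  | [] => [[e]]
  | g :: rest => if g.contains e then (g ++ [e]) :: rest else g :: pvAddElem rest e

def similarity_grouping (data : List Int) : List (List Int) :=
  data.foldl pvAddElem []

-- ===== PORT B =====
-- first pass: distinct keys in first-occurrence order
def pvKeysOf (data : List Int) : List Int :=
  data.foldl (fun ks x => if ks.contains x then ks else ks ++ [x]) []

-- second pass: one filter of the whole data per key
def similarity_grouping_alt (data : List Int) : List (List Int) :=
  (pvKeysOf data).map (fun k => data.filter (fun y => y == k))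

-- ===== PRECONDITION & SPEC =====
def Spec_similarity_grouping (data : List Int) (out : List (List Int)) : Prop := out = similarity_grouping_alt data
instance (data : List Int) (out : List (List Int)) : Decidable (Spec_similarity_grouping data out) := by unfold Spec_similarity_grouping; infer_instance

-- ===== CLAIM (what is proved, stated in full; the proofs are below) =====
def Claim_equal_similarity_grouping : Prop := ∀ (data : List Int), Dom_similarity_grouping data → Spec_similarity_grouping data (similarity_grouping data)

-- ===== LEMMAS AND PROOFS =====

theorem pvKeysOf_append (p : List Int) (x : Int) :
    pvKeysOf (p ++ [x]) =
      if (pvKeysOf p).contains x then pvKeysOf p else pvKeysOf p ++ [x] := by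
  simp [pvKeysOf, List.foldl_append]

theorem mem_pvKeysOf (p : List Int) (x : Int) : x ∈ pvKeysOf p ↔ x ∈ p := by
  induction p using List.reverseRecOn with
  | nil => simp [pvKeysOf]
  | append_singleton p a ih =>
    rw [pvKeysOf_append]
    split_ifs with h
    · simp only [List.mem_append, List.mem_singleton, ih]
      constructor
      · exact Or.inl
      · rintro (hx | rfl)
        · exact hx
        · exact ih.mp (by simpa using h)
    · simp [ih]

theorem nodup_pvKeysOf (p : List Int) : (pvKeysOf p).Nodup := by
  induction p using List.reverseRecOn with
  | nil => simp [pvKeysOf]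
  | append_singleton p a ih =>
    rw [pvKeysOf_append]
    split_ifs with h
    · exact ih
    · simp only [List.nodup_append, List.nodup_singleton, true_and, ih]
      intro b hb c hc
      simp only [List.mem_singleton] at hc
      subst hc
      intro hba
      exact (show c ∉ pvKeysOf p by simpa using h) (hba ▸ hb)

theorem pvAddElem_map (p : List Int) (x : Int) :
    ∀ (ks : List Int), ks.Nodup → (∀ k ∈ ks, k ∈ p) → (x ∈ ks ∨ x ∉ p) →
    pvAddElem (ks.map (fun k => p.filter (fun y => y == k))) x =
      if x ∈ ks then ks.map (fun k => (p ++ [x]).filter (fun y => y == k))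
      else (ks.map (fun k => (p ++ [x]).filter (fun y => y == k))) ++ [[x]] := by
  intro ks
  induction ks with
  | nil => intro _ _ _; simp [pvAddElem]
  | cons k ks ih =>
    intro hnd hsub hcase
    have hkp : k ∈ p := hsub k (List.mem_cons_self ..)
    have hcont : (p.filter (fun y => y == k)).contains x = true ↔ x = k := by
      simp only [List.contains_iff_mem, List.mem_filter, beq_iff_eq]
      constructor
      · rintro ⟨_, rfl⟩; rfl
      · rintro rfl; exact ⟨hkp, rfl⟩
    by_cases hxk : x = k
    · subst hxk
      simp only [List.map_cons, pvAddElem, hcont.mpr rfl, if_true,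
        if_pos (List.mem_cons_self ..)]
      congr 1
      · rw [List.filter_append]
        simp
      · refine List.map_congr_left (fun k' hk' => ?_)
        have hne : k' ≠ x := by
          rintro rfl
          exact (List.nodup_cons.mp hnd).1 hk'
        rw [List.filter_append]
        simp [Ne.symm hne]
    · have hcont' : (p.filter (fun y => y == k)).contains x = false := by
        rw [Bool.eq_false_iff]
        intro hc
        exact hxk (hcont.mp hc)
      have hcase' : x ∈ ks ∨ x ∉ p := by
        rcases hcase with h | h
        · rcases List.mem_cons.mp h with rfl | h
          · exact absurd rfl hxk
          · exact Or.inl h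
        · exact Or.inr h
      have ihr := ih (List.nodup_cons.mp hnd).2 (fun k' hk' => hsub k' (List.mem_cons_of_mem _ hk')) hcase'
      have hhead : (p ++ [x]).filter (fun y => y == k) = p.filter (fun y => y == k) := by
        rw [List.filter_append]
        simp [hxk]
      by_cases hx : x ∈ ks
      · simp only [List.map_cons, pvAddElem, hcont', Bool.false_eq_true, if_false, ihr,
          if_pos hx, if_pos (List.mem_cons_of_mem _ hx), hhead]
      · have hx' : x ∉ k :: ks := by
          simp [List.mem_cons, hxk, hx]
        simp only [List.map_cons, pvAddElem, hcont', Bool.false_eq_true, if_false, ihr,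
          if_neg hx, if_neg hx', hhead, List.cons_append]

theorem grouping_eq (p : List Int) :
    p.foldl pvAddElem [] = (pvKeysOf p).map (fun k => p.filter (fun y => y == k)) := by
  induction p using List.reverseRecOn with
  | nil => simp [pvKeysOf]
  | append_singleton p x ih =>
    rw [List.foldl_append, List.foldl_cons, List.foldl_nil, ih]
    have hcase : x ∈ pvKeysOf p ∨ x ∉ p := by
      by_cases h : x ∈ p
      · exact Or.inl ((mem_pvKeysOf p x).mpr h)
      · exact Or.inr h
    rw [pvAddElem_map p x (pvKeysOf p) (nodup_pvKeysOf p)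
      (fun k hk => (mem_pvKeysOf p k).mp hk) hcase, pvKeysOf_append]
    by_cases h : x ∈ pvKeysOf p
    · have hc : (pvKeysOf p).contains x = true := by simpa using h
      rw [if_pos h, if_pos hc]
    · have hc : (pvKeysOf p).contains x = false := by simpa using h
      have hxp : x ∉ p := fun hp => h ((mem_pvKeysOf p x).mpr hp)
      rw [if_neg h, if_neg (by simpa using h)]
      rw [List.map_append, List.map_cons, List.map_nil]
      congr 1
      rw [List.filter_append]
      have hnil : p.filter (fun y => y == x) = [] :=
        List.filter_eq_nil_iff.mpr (fun a ha hb => by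
          simp only [beq_iff_eq] at hb
          subst hb
          exact hxp ha)
      simp [hnil]

-- ===== VERDICT (by name: the statement is the Claim_ definition above) =====
theorem similarity_grouping_spec : Claim_equal_similarity_grouping := by
  intro data _
  show similarity_grouping data = similarity_grouping_alt data
  simpa [similarity_grouping, similarity_grouping_alt] using grouping_eq data
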